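-- pv_equiv track=rewrite | github.com/wjddn2165/ProblemSolving | 프로그래머스/3/258705. 산 모양 타일링/산 모양 타일링.py | solution
-- ===== SOURCE A (Python) =====
-- MOD = 10007
--
-- def solution(n, tops):
--     dp = [0] * (2 * n + 2)
--     dp[0] = 1
--     dp[1] = 1
--
--     for i in range(2, 2 * n + 2):
--         # 짝수번 째 삼각형
--         if i % 2 == 0:
--             if tops[(i // 2) - 1] == 1:
--                 dp[i] = (dp[i - 1] * 2 + dp[i - 2]) % MOD
--             else:
--                 dp[i] = (dp[i - 1] + dp[i - 2]) % MOD
--         # 홀수번 째 삼각형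
--         else:
--             dp[i] = (dp[i - 1] + dp[i - 2]) % MOD
--
--     return dp[-1]
-- ===== SOURCE B (Python) =====
-- MOD = 10007
--
-- def solution(n, tops):
--     # Linear-algebra reformulation: each mountain column multiplies the state
--     # (even, odd) row vector by a 2x2 matrix; a divide-and-conquer product of
--     # those matrices mod 10007 yields the answer.
--     def mat(t):
--         return (1, 1, 2, 3) if t == 1 else (1, 1, 1, 2)
--
--     def mul(A, B):
--         a, b, c, d = A
--         e, f, g, h = B
--         return ((a * e + b * g) % MOD, (a * f + b * h) % MOD,
--                 (c * e + d * g) % MOD, (c * f + d * h) % MOD)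
--
--     def prod(ms, lo, hi):
--         if hi - lo == 0:
--             return (1, 0, 0, 1)
--         if hi - lo == 1:
--             return ms[lo]
--         mid = (lo + hi) // 2
--         return mul(prod(ms, lo, mid), prod(ms, mid, hi))
--
--     ms = [mat(tops[i]) for i in range(n)]
--     p = prod(ms, 0, len(ms))
--     return (p[1] + p[3]) % MOD
-- ===== Notes on version B (the rewrite author's own statement) =====
-- stated objective: alternative
-- what changed: Replaces the linear dp-array recurrence with a linear-algebra formulation: each column becomes a 2x2 matrix mod 10007 and the answer is read off a divide-and-conquer product of these matrices applied to the initial vector.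
import Mathlib
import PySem

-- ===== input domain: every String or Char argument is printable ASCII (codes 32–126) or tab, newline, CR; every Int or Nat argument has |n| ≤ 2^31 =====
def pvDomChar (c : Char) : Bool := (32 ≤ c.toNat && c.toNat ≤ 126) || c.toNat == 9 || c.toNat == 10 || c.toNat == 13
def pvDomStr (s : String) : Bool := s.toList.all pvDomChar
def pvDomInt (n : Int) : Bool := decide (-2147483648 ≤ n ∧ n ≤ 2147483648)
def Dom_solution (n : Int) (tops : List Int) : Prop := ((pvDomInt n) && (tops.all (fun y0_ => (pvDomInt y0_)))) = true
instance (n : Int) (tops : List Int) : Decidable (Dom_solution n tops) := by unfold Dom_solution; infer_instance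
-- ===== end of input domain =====

-- B recasts the dp recurrence as a product of per-column 2x2 matrices mod 10007,
-- computed by divide-and-conquer and applied to the initial vector (alternative algorithm, same cost).

-- ===== PORT A =====
-- the body of A's for-loop over i in range(2, 2*n+2)
def stepA (tops : List Int) (dp : List Int) (i : Int) : List Int :=
  if PySem.Int.mod i 2 == 0 then
    if PySem.List.pyGetD tops (PySem.Int.floordiv i 2 - 1) 0 == 1 then
      dp.set i.toNat (PySem.Int.mod (PySem.List.pyGetD dp (i - 1) 0 * 2 + PySem.List.pyGetD dp (i - 2) 0) 10007)
    else
      dp.set i.toNat (PySem.Int.mod (PySem.List.pyGetD dp (i - 1) 0 + PySem.List.pyGetD dp (i - 2) 0) 10007)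
  else
    dp.set i.toNat (PySem.Int.mod (PySem.List.pyGetD dp (i - 1) 0 + PySem.List.pyGetD dp (i - 2) 0) 10007)

def solution (n : Int) (tops : List Int) : Int :=
  let dp0 : List Int := ((List.replicate (2 * n + 2).toNat 0).set 0 1).set 1 1
  let dp := (PySem.List.pyRange 2 (2 * n + 2) 1).foldl (stepA tops) dp0
  PySem.List.pyGetD dp (-1) 0

-- ===== PORT B =====
-- mat(t): the 2x2 column matrix, stored as a flat 4-tuple (row-major)
def pvMat (t : Int) : Int × Int × Int × Int :=
  if t == 1 then (1, 1, 2, 3) else (1, 1, 1, 2)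

-- mul(A, B): entrywise 2x2 matrix product mod 10007
def pvMul (A B : Int × Int × Int × Int) : Int × Int × Int × Int :=
  (PySem.Int.mod (A.1 * B.1 + A.2.1 * B.2.2.1) 10007,
   PySem.Int.mod (A.1 * B.2.1 + A.2.1 * B.2.2.2) 10007,
   PySem.Int.mod (A.2.2.1 * B.1 + A.2.2.2 * B.2.2.1) 10007,
   PySem.Int.mod (A.2.2.1 * B.2.1 + A.2.2.2 * B.2.2.2) 10007)

-- prod(ms, lo, hi): divide-and-conquer product of ms[lo:hi]; in B lo and hi are
-- always nonnegative list indices, so they are ported as Nat (// 2 on them is Nat division)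
def pvProd (ms : List (Int × Int × Int × Int)) (lo hi : Nat) : Int × Int × Int × Int :=
  if hi - lo = 0 then (1, 0, 0, 1)
  else if hi - lo = 1 then ms.getD lo (0, 0, 0, 0)
  else
    let mid := (lo + hi) / 2
    pvMul (pvProd ms lo mid) (pvProd ms mid hi)
termination_by hi - lo
decreasing_by all_goals omega

def solution_alt (n : Int) (tops : List Int) : Int :=
  let ms := (PySem.List.pyRange 0 n 1).map (fun i => pvMat (PySem.List.pyGetD tops i 0))
  let p := pvProd ms 0 ms.length
  PySem.Int.mod (p.2.1 + p.2.2.2) 10007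

-- ===== PRECONDITION & SPEC =====
-- Pre_ excludes exactly the inputs where A raises IndexError: n < 0 (dp[0] on the empty list) or fewer than n entries in tops.
def Pre_solution (n : Int) (tops : List Int) : Prop := 0 ≤ n ∧ n ≤ tops.length
instance (n : Int) (tops : List Int) : Decidable (Pre_solution n tops) := by unfold Pre_solution; infer_instance
def pvWitness_solution : Int × List Int := (2, [1, 2])

def Spec_solution (n : Int) (tops : List Int) (out : Int) : Prop := out = solution_alt n tops
instance (n : Int) (tops : List Int) (out : Int) : Decidable (Spec_solution n tops out) := by unfold Spec_solution; infer_instance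

-- ===== CLAIM (what is proved, stated in full; the proofs are below) =====
def Claim_equal_solution : Prop := ∀ (n : Int) (tops : List Int), Dom_solution n tops → Pre_solution n tops → Spec_solution n tops (solution n tops)

-- ===== LEMMAS AND PROOFS =====

-- proof-only helper: the fused per-column transition on the (even, odd) dp pair
def stepB (eo : Int × Int) (t : Int) : Int × Int :=
  let e := PySem.Int.mod (if t == 1 then 2 * eo.2 + eo.1 else eo.2 + eo.1) 10007
  let o := PySem.Int.mod (e + eo.2) 10007
  (e, o)

theorem stepA_length (tops dp : List Int) (i : Int) : (stepA tops dp i).length = dp.length := by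
  unfold stepA; split_ifs <;> simp

theorem stepA_append (tops dp zs : List Int) (i : Int) (h2 : 2 ≤ i) (hi : i < (dp.length : Int)) :
    stepA tops (dp ++ zs) i = stepA tops dp i ++ zs := by
  have g : ∀ j : Int, 0 ≤ j → j < (dp.length : Int) →
      PySem.List.pyGetD (dp ++ zs) j 0 = PySem.List.pyGetD dp j 0 := by
    intro j hj0 hj
    rw [show j = ((j.toNat : Nat) : Int) by omega, PySem.List.pyGetD_natCast,
        PySem.List.pyGetD_natCast, List.getD_append _ _ _ _ (by omega)]
  unfold stepA
  rw [g (i - 1) (by omega) (by omega), g (i - 2) (by omega) (by omega)]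
  split_ifs <;> rw [List.set_append_left _ _ (by omega)]

theorem foldl_stepA_append (tops : List Int) (L : List Int) (dp zs : List Int)
    (h : ∀ i ∈ L, 2 ≤ i ∧ i < (dp.length : Int)) :
    L.foldl (stepA tops) (dp ++ zs) = L.foldl (stepA tops) dp ++ zs := by
  induction L generalizing dp with
  | nil => rfl
  | cons i L ih =>
      have hi := h i (by simp)
      simp only [List.foldl_cons, stepA_append tops dp zs i hi.1 hi.2]
      exact ih _ (by intro j hj; simpa [stepA_length] using h j (by simp [hj]))

-- A's dp after the loop, for n = m, as a function of m
def dpA (tops : List Int) (m : Nat) : List Int :=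
  (PySem.List.pyRange 2 (2 * (m : Int) + 2) 1).foldl (stepA tops)
    (((List.replicate (2 * m + 2) (0 : Int)).set 0 1).set 1 1)

-- main invariant: length and the last two entries versus the rolling even/odd pair
theorem dpA_invariant (tops : List Int) (m : Nat) (hm : m ≤ tops.length) :
    (dpA tops m).length = 2 * m + 2 ∧
    (dpA tops m).getD (2 * m) 0 = ((PySem.List.pyRange 0 (m : Int) 1).foldl (fun eo i => stepB eo (PySem.List.pyGetD tops i 0)) (1, 1)).1 ∧
    (dpA tops m).getD (2 * m + 1) 0 = ((PySem.List.pyRange 0 (m : Int) 1).foldl (fun eo i => stepB eo (PySem.List.pyGetD tops i 0)) (1, 1)).2 := by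
  induction m with
  | zero =>
      have h : dpA tops 0 = [1, 1] := by
        norm_num [dpA, PySem.List.pyRange_one_eq_nil, List.replicate]
      simp [h, PySem.List.pyRange_one_eq_nil]
  | succ m ih =>
      have hmlt : m < tops.length := hm
      obtain ⟨hlen, he, ho⟩ := ih (Nat.le_of_succ_le hm)
      set D := dpA tops m with hD
      set p := (PySem.List.pyRange 0 (m : Int) 1).foldl (fun eo i => stepB eo (PySem.List.pyGetD tops i 0)) (1, 1) with hp
      set t := tops.getD m 0 with ht
      -- split the range at the last two indices
      have hr : PySem.List.pyRange 2 (2 * ((m : Int) + 1) + 2) 1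
          = PySem.List.pyRange 2 (2 * (m : Int) + 2) 1 ++ [2 * (m : Int) + 2, 2 * (m : Int) + 3] := by
        rw [show 2 * ((m : Int) + 1) + 2 = (2 * (m : Int) + 3) + 1 by ring,
            PySem.List.pyRange_one_succ_right (by omega),
            show 2 * (m : Int) + 3 = (2 * (m : Int) + 2) + 1 by ring,
            PySem.List.pyRange_one_succ_right (by omega)]
        simp
      -- the bigger initial dp is the smaller one padded with two zeros
      have hinit : ((List.replicate (2 * (m + 1) + 2) (0 : Int)).set 0 1).set 1 1
          = ((List.replicate (2 * m + 2) (0 : Int)).set 0 1).set 1 1 ++ [0, 0] := by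
        rw [show 2 * (m + 1) + 2 = (2 * m + 2) + 2 by ring, List.replicate_add,
            List.set_append_left _ _ (by simp), List.set_append_left _ _ (by simp)]
        rfl
      have hmod2 : PySem.Int.mod (2 * (m : Int) + 2) 2 = 0 := by
        rw [PySem.Int.mod_eq_emod_of_pos (by norm_num)]; omega
      have hmod3 : PySem.Int.mod (2 * (m : Int) + 3) 2 = 1 := by
        rw [PySem.Int.mod_eq_emod_of_pos (by norm_num)]; omega
      have hfd : PySem.Int.floordiv (2 * (m : Int) + 2) 2 - 1 = ((m : Nat) : Int) := by
        rw [PySem.Int.floordiv_eq_ediv_of_pos (by norm_num)]; omega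
      -- the fold for m+1 is the fold for m (padded) plus the two last steps
      have hfold : dpA tops (m + 1)
          = stepA tops (stepA tops (D ++ [0, 0]) (2 * (m : Int) + 2)) (2 * (m : Int) + 3) := by
        unfold dpA
        simp only [Nat.cast_add, Nat.cast_one]
        rw [hr, hinit, List.foldl_append,
            foldl_stepA_append tops _ _ _ (by
              intro i hi
              have hb := PySem.List.mem_pyRange_one.mp hi
              refine ⟨hb.1, ?_⟩
              have : ((((List.replicate (2 * m + 2) (0:Int)).set 0 1).set 1 1).length : Int) = 2 * (m : Int) + 2 := by
                simp
              rw [this]; exact hb.2)]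
        simp only [List.foldl_cons, List.foldl_nil]
        rfl
      -- the even step computes the new e alongside
      have hget1 : (D ++ ([0, 0] : List Int)).getD (2 * m + 1) 0 = p.2 := by
        rw [List.getD_append _ _ _ _ (by omega)]; exact ho
      have hget0 : (D ++ ([0, 0] : List Int)).getD (2 * m) 0 = p.1 := by
        rw [List.getD_append _ _ _ _ (by omega)]; exact he
      have hstep1 : stepA tops (D ++ [0, 0]) (2 * (m : Int) + 2) = D ++ [(stepB p t).1, 0] := by
        unfold stepA
        rw [if_pos (show (PySem.Int.mod (2 * (m : Int) + 2) 2 == 0) = true by rw [hmod2]; rfl)]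
        rw [hfd, PySem.List.pyGetD_natCast,
            show (2 * (m : Int) + 2) - 1 = ((2 * m + 1 : Nat) : Int) by push_cast; ring,
            show (2 * (m : Int) + 2) - 2 = ((2 * m : Nat) : Int) by push_cast; ring,
            PySem.List.pyGetD_natCast, PySem.List.pyGetD_natCast, hget1, hget0,
            show (2 * (m : Int) + 2).toNat = 2 * m + 2 by omega]
        simp only [stepB, ← ht]
        split_ifs with hc
        · rw [List.set_append_right _ _ (by omega), hlen]
          simp [mul_comm]
        · rw [List.set_append_right _ _ (by omega), hlen]
          simp
      -- the odd step computes the new o alongside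
      have hstep2 : stepA tops (D ++ [(stepB p t).1, 0]) (2 * (m : Int) + 3)
          = D ++ [(stepB p t).1, (stepB p t).2] := by
        unfold stepA
        rw [if_neg (show ¬((PySem.Int.mod (2 * (m : Int) + 3) 2 == 0) = true) by rw [hmod3]; decide)]
        rw [show (2 * (m : Int) + 3) - 1 = ((2 * m + 2 : Nat) : Int) by push_cast; ring,
            show (2 * (m : Int) + 3) - 2 = ((2 * m + 1 : Nat) : Int) by push_cast; ring,
            PySem.List.pyGetD_natCast, PySem.List.pyGetD_natCast,
            List.getD_append_right _ _ _ _ (by omega),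
            List.getD_append _ _ _ _ (by omega), ho,
            show (2 * (m : Int) + 3).toNat = 2 * m + 3 by omega,
            List.set_append_right _ _ (by omega), hlen]
        simp only [stepB]
        simp
      -- the pair advances by one stepB
      have hB : (PySem.List.pyRange 0 ((m : Int) + 1) 1).foldl (fun eo i => stepB eo (PySem.List.pyGetD tops i 0)) (1, 1) = stepB p t := by
        rw [PySem.List.pyRange_one_succ_right (by omega), List.foldl_append]
        simp only [List.foldl_cons, List.foldl_nil, ← hp, PySem.List.pyGetD_natCast, ← ht]
      simp only [Nat.cast_add, Nat.cast_one]
      rw [hfold, hstep1, hstep2, hB]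
      refine ⟨by simp [hlen]; try ring, ?_, ?_⟩
      · rw [show 2 * (m + 1) = 2 * m + 2 by ring, List.getD_append_right _ _ _ _ (by omega), hlen]
        simp
      · rw [show 2 * (m + 1) + 1 = 2 * m + 3 by ring, List.getD_append_right _ _ _ _ (by omega), hlen]
        simp

-- convert the pyRange-indexed pair fold to a fold over the list prefix itself
theorem pairfold_take (tops : List Int) (m : Nat) (hm : m ≤ tops.length) :
    (PySem.List.pyRange 0 (m : Int) 1).foldl (fun eo i => stepB eo (PySem.List.pyGetD tops i 0)) (1, 1)
      = (tops.take m).foldl stepB (1, 1) := by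
  induction m with
  | zero => simp [PySem.List.pyRange_one_eq_nil]
  | succ m ih =>
      rw [show ((m + 1 : Nat) : Int) = (m : Int) + 1 by push_cast; ring,
          PySem.List.pyRange_one_succ_right (by omega), List.foldl_append,
          ih (Nat.le_of_succ_le hm),
          List.take_succ, List.foldl_append]
      have : tops[m]?.toList = [tops.getD m 0] := by
        rw [List.getElem?_eq_getElem (by omega), List.getD_eq_getElem _ _ (by omega)]
        rfl
      simp [this, PySem.List.pyGetD_natCast]

-- B's comprehension over range(n) is the mapped prefix of tops
theorem matlist_take (tops : List Int) (m : Nat) (hm : m ≤ tops.length) :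
    (PySem.List.pyRange 0 (m : Int) 1).map (fun i => pvMat (PySem.List.pyGetD tops i 0))
      = (tops.take m).map pvMat := by
  induction m with
  | zero => simp [PySem.List.pyRange_one_eq_nil]
  | succ m ih =>
      rw [show ((m + 1 : Nat) : Int) = (m : Int) + 1 by push_cast; ring,
          PySem.List.pyRange_one_succ_right (by omega), List.map_append,
          ih (Nat.le_of_succ_le hm), List.take_succ, List.map_append]
      have : tops[m]?.toList = [tops.getD m 0] := by
        rw [List.getElem?_eq_getElem (by omega), List.getD_eq_getElem _ _ (by omega)]
        rfl
      simp [this, PySem.List.pyGetD_natCast]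

-- Python's % 10007 is emod
theorem pvmod (x : Int) : PySem.Int.mod x 10007 = x % 10007 :=
  PySem.Int.mod_eq_emod_of_pos (by norm_num)

theorem pvcastmod (x : Int) : ((x % (10007 : Int) : Int) : ZMod 10007) = (x : ZMod 10007) := by
  have := ZMod.intCast_mod x 10007
  simpa using this

theorem pvmod_eq_of_cast {x y : Int} (h : ((x : Int) : ZMod 10007) = (y : ZMod 10007)) :
    x % 10007 = y % 10007 := by
  have := (ZMod.intCast_eq_intCast_iff' x y 10007).mp h
  simpa using this

-- reduced matrices: all four entries in [0, 10007)
def pvRed (A : Int × Int × Int × Int) : Prop :=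
  0 ≤ A.1 ∧ A.1 < 10007 ∧ 0 ≤ A.2.1 ∧ A.2.1 < 10007 ∧
  0 ≤ A.2.2.1 ∧ A.2.2.1 < 10007 ∧ 0 ≤ A.2.2.2 ∧ A.2.2.2 < 10007

theorem pvRed_mat (t : Int) : pvRed (pvMat t) := by
  unfold pvMat pvRed; split_ifs <;> norm_num

theorem pvRed_id : pvRed (1, 0, 0, 1) := by unfold pvRed; norm_num

theorem pvRed_mul (A B : Int × Int × Int × Int) : pvRed (pvMul A B) := by
  unfold pvMul pvRed
  refine ⟨?_, ?_, ?_, ?_, ?_, ?_, ?_, ?_⟩ <;>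
    first
      | exact PySem.Int.mod_nonneg _ (by norm_num)
      | exact PySem.Int.mod_lt _ (by norm_num)

theorem pvMul_id_left (A : Int × Int × Int × Int) (h : pvRed A) : pvMul (1, 0, 0, 1) A = A := by
  obtain ⟨a, b, c, d⟩ := A
  obtain ⟨h1, h2, h3, h4, h5, h6, h7, h8⟩ := h
  simp only [pvMul, pvmod]
  simp only at h1 h2 h3 h4 h5 h6 h7 h8
  norm_num [Int.emod_eq_of_lt, h1, h2, h3, h4, h5, h6, h7, h8]

theorem pvMul_id_right (A : Int × Int × Int × Int) (h : pvRed A) : pvMul A (1, 0, 0, 1) = A := by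
  obtain ⟨a, b, c, d⟩ := A
  obtain ⟨h1, h2, h3, h4, h5, h6, h7, h8⟩ := h
  simp only [pvMul, pvmod]
  simp only at h1 h2 h3 h4 h5 h6 h7 h8
  norm_num [Int.emod_eq_of_lt, h1, h2, h3, h4, h5, h6, h7, h8]

theorem pvMul_assoc (A B C : Int × Int × Int × Int) :
    pvMul (pvMul A B) C = pvMul A (pvMul B C) := by
  simp only [pvMul, pvmod]
  refine Prod.ext ?_ (Prod.ext ?_ (Prod.ext ?_ ?_)) <;>
    · apply pvmod_eq_of_cast
      push_cast [pvcastmod]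
      ring

theorem pvRed_fold (l : List (Int × Int × Int × Int)) (s : Int × Int × Int × Int) (hs : pvRed s)
    (hl : ∀ A ∈ l, pvRed A) : pvRed (l.foldl pvMul s) := by
  induction l generalizing s with
  | nil => exact hs
  | cons x l ih =>
      simp only [List.foldl_cons]
      exact ih (pvMul s x) (pvRed_mul s x) (fun A hA => hl A (by simp [hA]))

theorem pv_foldl_hom (l : List (Int × Int × Int × Int)) (s : Int × Int × Int × Int)
    (hs : pvRed s) (hl : ∀ A ∈ l, pvRed A) :
    l.foldl pvMul s = pvMul s (l.foldl pvMul (1, 0, 0, 1)) := by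
  induction l generalizing s with
  | nil => simp [pvMul_id_right s hs]
  | cons x l ih =>
      have hx : pvRed x := hl x (by simp)
      have htail : ∀ A ∈ l, pvRed A := fun A hA => hl A (by simp [hA])
      simp only [List.foldl_cons]
      rw [ih (pvMul s x) (pvRed_mul s x) htail, pvMul_assoc,
          pvMul_id_left x hx, ← ih x hx htail]

theorem pv_fold_append (xs ys : List (Int × Int × Int × Int))
    (hx : ∀ A ∈ xs, pvRed A) (hy : ∀ A ∈ ys, pvRed A) :
    (xs ++ ys).foldl pvMul (1, 0, 0, 1)
      = pvMul (xs.foldl pvMul (1, 0, 0, 1)) (ys.foldl pvMul (1, 0, 0, 1)) := by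
  rw [List.foldl_append]
  exact pv_foldl_hom ys _ (pvRed_fold xs _ pvRed_id hx) hy

-- the divide-and-conquer product is the left-fold product of the segment
theorem pvProd_eq (ms : List (Int × Int × Int × Int)) (hred : ∀ A ∈ ms, pvRed A) :
    ∀ (k lo hi : Nat), hi - lo = k → lo ≤ hi → hi ≤ ms.length →
      pvProd ms lo hi = ((ms.drop lo).take (hi - lo)).foldl pvMul (1, 0, 0, 1) := by
  intro k
  induction k using Nat.strong_induction_on with
  | _ k ih =>
      intro lo hi hk hlh hlen
      rw [pvProd]
      split_ifs with h0 h1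
      · simp [h0]
      · have hlo : lo < ms.length := by omega
        have hseg : (ms.drop lo).take (hi - lo) = [ms[lo]] := by
          rw [List.drop_eq_getElem_cons hlo, h1, List.take_succ_cons, List.take_zero]
        rw [hseg]
        simp only [List.foldl_cons, List.foldl_nil]
        rw [pvMul_id_left _ (hred _ (List.getElem_mem hlo)), List.getD_eq_getElem _ _ hlo]
      · have h2 : 2 ≤ hi - lo := by omega
        show pvMul (pvProd ms lo ((lo + hi) / 2)) (pvProd ms ((lo + hi) / 2) hi) = _
        set mid := (lo + hi) / 2 with hmid
        have hmid1 : lo < mid := by omega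
        have hmid2 : mid < hi := by omega
        have hsub : ∀ A ∈ (ms.drop lo), pvRed A := fun A hA => hred A (List.mem_of_mem_drop hA)
        have hsplit : (ms.drop lo).take (hi - lo)
            = (ms.drop lo).take (mid - lo) ++ (ms.drop mid).take (hi - mid) := by
          rw [show hi - lo = (mid - lo) + (hi - mid) by omega, List.take_add]
          congr 1
          rw [List.drop_drop, show lo + (mid - lo) = mid by omega]
        rw [hsplit, pv_fold_append _ _
              (fun A hA => hred A (List.mem_of_mem_drop (List.mem_of_mem_take hA)))
              (fun A hA => hred A (List.mem_of_mem_drop (List.mem_of_mem_take hA))),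
            ih (mid - lo) (by omega) lo mid rfl (by omega) (by omega),
            ih (hi - mid) (by omega) mid hi rfl (by omega) (by omega)]

-- reading the (e, o) pair off a matrix: the row vector (1, 1) times the matrix, mod 10007
def pvPairOf (P : Int × Int × Int × Int) : Int × Int :=
  ((P.1 + P.2.2.1) % 10007, (P.2.1 + P.2.2.2) % 10007)

theorem pv_pair_step (P : Int × Int × Int × Int) (t : Int) :
    pvPairOf (pvMul P (pvMat t)) = stepB (pvPairOf P) t := by
  obtain ⟨a, b, c, d⟩ := P
  by_cases h : t = 1
  · subst h
    simp only [pvMat, pvMul, pvPairOf, stepB, pvmod]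
    norm_num
    constructor <;> (apply pvmod_eq_of_cast; push_cast [pvcastmod]; ring)
  · have hb : (t == 1) = false := by simp [h]
    simp only [pvMat, pvMul, pvPairOf, stepB, pvmod, hb, if_false, Bool.false_eq_true]
    norm_num
    constructor <;> (apply pvmod_eq_of_cast; push_cast [pvcastmod]; ring)

theorem pv_bridge (ts : List Int) :
    pvPairOf ((ts.map pvMat).foldl pvMul (1, 0, 0, 1)) = ts.foldl stepB (1, 1) := by
  induction ts using List.reverseRecOn with
  | nil => simp [pvPairOf]
  | append_singleton ts t ih =>
      rw [List.map_append, List.foldl_append, List.foldl_append]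
      simp only [List.map_cons, List.map_nil, List.foldl_cons, List.foldl_nil]
      rw [pv_pair_step, ih]

-- ===== VERDICT (by name: the statement is the Claim_ definition above) =====
theorem solution_spec : Claim_equal_solution := by
  unfold Claim_equal_solution
  intro n tops _ hpre
  obtain ⟨h0, hlenI⟩ := hpre
  unfold Spec_solution
  obtain ⟨m, rfl⟩ : ∃ m : Nat, n = (m : Int) := ⟨n.toNat, (Int.toNat_of_nonneg h0).symm⟩
  have hm : m ≤ tops.length := by exact_mod_cast hlenI
  -- A's side: the last dp entry is the rolling pair's o
  obtain ⟨hL, hE, hO⟩ := dpA_invariant tops m hm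
  have hA : solution (m : Int) tops = PySem.List.pyGetD (dpA tops m) (-1) 0 := by
    unfold solution dpA
    rw [show ((2 * (m : Int) + 2).toNat) = 2 * m + 2 by omega]
  have hne : dpA tops m ≠ [] := by
    intro h; rw [h] at hL; simp at hL
  rw [hA, PySem.List.pyGetD_neg_one _ _ hne, List.getLast_eq_getElem]
  have hidx : (dpA tops m).length - 1 = 2 * m + 1 := by omega
  simp only [hidx]
  rw [← List.getD_eq_getElem (dpA tops m) 0 (by omega), hO, pairfold_take tops m hm]
  -- B's side: the matrix product applied to (1, 1) is the same pair
  simp only [solution_alt]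
  rw [matlist_take tops m hm]
  set ms := (tops.take m).map pvMat with hms
  have hred : ∀ A ∈ ms, pvRed A := by
    intro A hA
    obtain ⟨t, _, rfl⟩ := List.mem_map.mp hA
    exact pvRed_mat t
  rw [pvProd_eq ms hred ms.length 0 ms.length rfl (by omega) le_rfl]
  simp only [List.drop_zero, Nat.sub_zero, List.take_length]
  rw [pvmod, ← pv_bridge (tops.take m)]
  rfl
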